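-- pv_equiv track=rewrite | github.com/nschank/ution | password.py | build_sample_space
-- ===== SOURCE A (Python) =====
-- from string import ascii_lowercase, ascii_uppercase, digits, punctuation
--
-- def build_sample_space(str, escaped=False):
-- 	""" Build a sample space string using a string describing how it should
-- 	be built. Return a string which can be sampled uniformly at random to
-- 	satisfy the described character class.
-- 	"""
-- 	if not str:
-- 		return ""
-- 	first_char = str[0]
-- 	if escaped:
-- 		return {"a": ascii_lowercase,
-- 				"A": ascii_uppercase,
-- 				"0": digits,
-- 				"!": punctuation,
-- 				"s": " ",
-- 				"\\": "\\"
-- 				}.get(first_char, "") + build_sample_space(str[1:],False)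
-- 	elif first_char == "\\":
-- 		return build_sample_space(str[1:],True)
-- 	else:
-- 		return first_char + build_sample_space(str[1:],False)
-- ===== SOURCE B (Python) =====
-- from string import ascii_lowercase, ascii_uppercase, digits, punctuation
--
-- def _expand(c):
-- 	if c == "a": return ascii_lowercase
-- 	if c == "A": return ascii_uppercase
-- 	if c == "0": return digits
-- 	if c == "!": return punctuation
-- 	if c == "s": return " "
-- 	if c == "\\": return "\\"
-- 	return ""
--
-- def build_sample_space(str, escaped=False):
-- 	""" Build a sample space string from an escape-coded spec.
-- 	Splits on backslashes once; each chunk after a separator starts with an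
-- 	escaped character (an empty chunk that is not last means the escaped
-- 	character was the backslash itself, and the following chunk is literal).
-- 	"""
-- 	parts = str.split("\\")
-- 	out = []
-- 	i = 0
-- 	esc = escaped
-- 	while i < len(parts):
-- 		p = parts[i]
-- 		if esc:
-- 			if p:
-- 				out.append(_expand(p[0]))
-- 				out.append(p[1:])
-- 			elif i + 1 < len(parts):
-- 				out.append("\\")
-- 				i += 1
-- 				out.append(parts[i])
-- 		else:
-- 			out.append(p)
-- 		esc = True
-- 		i += 1
-- 	return "".join(out)
-- ===== Notes on version B (the rewrite author's own statement) =====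
-- stated objective: faster
-- what changed: Instead of A's per-character recursion with an escape flag, B splits the string on backslashes once and then processes the resulting chunks: each chunk after a separator starts with an escaped character (an empty non-final chunk encodes an escaped backslash and makes the following chunk literal), joining the pieces once at the end; this also removes A's repeated string re-concatenation.
import Mathlib
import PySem

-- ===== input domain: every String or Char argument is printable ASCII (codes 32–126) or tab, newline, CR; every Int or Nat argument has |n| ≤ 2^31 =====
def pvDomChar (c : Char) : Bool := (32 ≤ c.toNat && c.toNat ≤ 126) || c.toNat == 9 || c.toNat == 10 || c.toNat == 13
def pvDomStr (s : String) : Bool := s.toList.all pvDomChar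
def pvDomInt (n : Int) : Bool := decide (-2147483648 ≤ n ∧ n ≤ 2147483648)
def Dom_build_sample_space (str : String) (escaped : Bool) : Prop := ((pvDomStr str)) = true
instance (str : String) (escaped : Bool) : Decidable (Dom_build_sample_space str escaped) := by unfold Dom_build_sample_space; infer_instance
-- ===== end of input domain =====

-- B replaces A's per-character recursion by one split on '\' followed by a
-- chunk-processing loop, joining once (no repeated re-concatenation); objective: faster.

-- ===== PORT A =====
-- the {"a": ascii_lowercase, …}.get(first_char, "") dict of A (values as char lists)
def escMapA : PySem.Dict Char (List Char) := PySem.Dict.ofList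
  [('a', "abcdefghijklmnopqrstuvwxyz".toList),
   ('A', "ABCDEFGHIJKLMNOPQRSTUVWXYZ".toList),
   ('0', "0123456789".toList),
   ('!', "!\"#$%&'()*+,-./:;<=>?@[\\]^_`{|}~".toList),
   ('s', [' ']),
   ('\\', ['\\'])]

-- A's recursion, on the character list (strings ported via List Char per PySem)
def bssRec : List Char → Bool → List Char
  | [], _ => []
  | c :: rest, escaped =>
    if escaped then (escMapA.getD c []) ++ bssRec rest false
    else if c = '\\' then bssRec rest true
    else c :: bssRec rest false

def build_sample_space (str : String) (escaped : Bool) : String :=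
  String.mk (bssRec str.toList escaped)

-- ===== PORT B =====
-- Source B's _expand: an if-chain, not a dict
def bssExpand (c : Char) : List Char :=
  if c = 'a' then "abcdefghijklmnopqrstuvwxyz".toList
  else if c = 'A' then "ABCDEFGHIJKLMNOPQRSTUVWXYZ".toList
  else if c = '0' then "0123456789".toList
  else if c = '!' then "!\"#$%&'()*+,-./:;<=>?@[\\]^_`{|}~".toList
  else if c = 's' then [' ']
  else if c = '\\' then ['\\']
  else []

-- Python's str.split("\\"), hand-ported (exact: single-char separator, keeps
-- empty chunks, always returns at least one chunk)
def bssSplitBS : List Char → List (List Char)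
  | [] => [[]]
  | c :: cs =>
    if c = '\\' then [] :: bssSplitBS cs
    else
      match bssSplitBS cs with
      | [] => [[c]]          -- unreachable: split never returns []
      | p :: ps => (c :: p) :: ps

-- Source B's while-loop over the chunks: esc is the flag for the CURRENT chunk
-- (escaped for the first, True afterwards); an empty chunk that is not last
-- emits '\' and consumes the following chunk literally.
def bssProc : Bool → List (List Char) → List Char
  | _, [] => []
  | true, [] :: [] => []
  | true, [] :: q :: qs => '\\' :: (q ++ bssProc true qs)
  | true, (c :: rest) :: ps => bssExpand c ++ rest ++ bssProc true ps
  | false, p :: ps => p ++ bssProc true ps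

def build_sample_space_alt (str : String) (escaped : Bool) : String :=
  String.mk (bssProc escaped (bssSplitBS str.toList))

-- ===== PRECONDITION & SPEC =====
def Spec_build_sample_space (str : String) (escaped : Bool) (out : String) : Prop := out = build_sample_space_alt str escaped
instance (str : String) (escaped : Bool) (out : String) : Decidable (Spec_build_sample_space str escaped out) := by unfold Spec_build_sample_space; infer_instance

-- ===== CLAIM (what is proved, stated in full; the proofs are below) =====
def Claim_equal_build_sample_space : Prop := ∀ (str : String) (escaped : Bool), Dom_build_sample_space str escaped → Spec_build_sample_space str escaped (build_sample_space str escaped)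

-- ===== LEMMAS AND PROOFS =====

-- split never returns the empty list of chunks
theorem bssSplitBS_ne_nil (cs : List Char) : bssSplitBS cs ≠ [] := by
  cases cs with
  | nil => simp [bssSplitBS]
  | cons c cs =>
    simp only [bssSplitBS]
    split
    · simp
    · cases h : bssSplitBS cs <;> simp

-- the two escape tables agree pointwise
theorem expand_eq (c : Char) : escMapA.getD c [] = bssExpand c := by
  by_cases h1 : c = 'a'
  · subst h1; decide
  by_cases h2 : c = 'A'
  · subst h2; decide
  by_cases h3 : c = '0'
  · subst h3; decide
  by_cases h4 : c = '!'
  · subst h4; decide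
  by_cases h5 : c = 's'
  · subst h5; decide
  by_cases h6 : c = '\\'
  · subst h6; decide
  · have g1 : ('a' == c) = false := beq_eq_false_iff_ne.mpr (Ne.symm h1)
    have g2 : ('A' == c) = false := beq_eq_false_iff_ne.mpr (Ne.symm h2)
    have g3 : ('0' == c) = false := beq_eq_false_iff_ne.mpr (Ne.symm h3)
    have g4 : ('!' == c) = false := beq_eq_false_iff_ne.mpr (Ne.symm h4)
    have g5 : ('s' == c) = false := beq_eq_false_iff_ne.mpr (Ne.symm h5)
    have g6 : ('\\' == c) = false := beq_eq_false_iff_ne.mpr (Ne.symm h6)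
    have hmk : escMapA = PySem.Dict.mk
      [('a', "abcdefghijklmnopqrstuvwxyz".toList),
       ('A', "ABCDEFGHIJKLMNOPQRSTUVWXYZ".toList),
       ('0', "0123456789".toList),
       ('!', "!\"#$%&'()*+,-./:;<=>?@[\\]^_`{|}~".toList),
       ('s', [' ']),
       ('\\', ['\\'])] := rfl
    rw [hmk]
    simp [PySem.Dict.getD, PySem.Dict.get?,
      g1, g2, g3, g4, g5, g6, bssExpand, h1, h2, h3, h4, h5, h6]

-- main bridge: A's character recursion equals B's chunk processing of the split
theorem bssRec_eq_proc (cs : List Char) :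
    ∀ esc : Bool, bssRec cs esc = bssProc esc (bssSplitBS cs) := by
  induction cs with
  | nil => intro esc; cases esc <;> rfl
  | cons c cs ih =>
    intro esc
    obtain ⟨q, qs, hq⟩ : ∃ q qs, bssSplitBS cs = q :: qs := by
      cases h : bssSplitBS cs with
      | nil => exact absurd h (bssSplitBS_ne_nil cs)
      | cons q qs => exact ⟨q, qs, rfl⟩
    by_cases hc : c = '\\'
    · subst hc
      have h2 : bssSplitBS ('\\' :: cs) = [] :: bssSplitBS cs := by
        simp [bssSplitBS]
      cases esc with
      | false =>
        have h1 : bssRec ('\\' :: cs) false = bssRec cs true := by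
          simp [bssRec]
        rw [h1, h2, ih true, hq]
        simp [bssProc]
      | true =>
        have h1 : bssRec ('\\' :: cs) true = escMapA.getD '\\' [] ++ bssRec cs false := by
          simp [bssRec]
        have h3 : escMapA.getD '\\' [] = ['\\'] := by decide
        rw [h1, h3, h2, hq, ih false, hq]
        simp [bssProc]
    · have hs : bssSplitBS (c :: cs) = (c :: q) :: qs := by
        simp [bssSplitBS, hc, hq]
      cases esc with
      | false =>
        have h1 : bssRec (c :: cs) false = c :: bssRec cs false := by
          simp [bssRec, hc]
        rw [h1, hs, ih false, hq]
        simp [bssProc]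
      | true =>
        have h1 : bssRec (c :: cs) true = escMapA.getD c [] ++ bssRec cs false := by
          simp [bssRec]
        rw [h1, hs, ih false, hq, expand_eq]
        simp [bssProc]

-- ===== VERDICT (by name: the statement is the Claim_ definition above) =====
theorem build_sample_space_spec : Claim_equal_build_sample_space := by
  intro str escaped _
  unfold Spec_build_sample_space build_sample_space build_sample_space_alt
  rw [bssRec_eq_proc]
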